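-- pv_equiv track=rewrite | github.com/MrSilent/ProBuilder | builder.py | cuboid
-- ===== SOURCE A (Python) =====
-- def cuboid(x1, x2, y1, y2, z1, z2, fill=True):
--     x1, x2 = sorted((x1, x2))
--     y1, y2 = sorted((y1, y2))
--     z1, z2 = sorted((z1, z2))
--     result = set()
--     a = (x1 == x2) + (y1 == y2) + (z1 == z2)
--     for x in range(x1, x2 + 1):
--         for y in range(y1, y2 + 1):
--             for z in range(z1, z2 + 1):
--                 n = 0
--                 n += x in (x1, x2)
--                 n += y in (y1, y2)
--                 n += z in (z1, z2)
--                 if not fill and n <= a: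
--                     continue
--                 result.add((x, y, z))
--     return result
-- ===== SOURCE B (Python) =====
-- def cuboid(x1, x2, y1, y2, z1, z2, fill=True):
--     if x2 < x1:
--         x1, x2 = x2, x1
--     if y2 < y1:
--         y1, y2 = y2, y1
--     if z2 < z1:
--         z1, z2 = z2, z1
--     if fill:
--         return {(x, y, z)
--                 for x in range(x1, x2 + 1)
--                 for y in range(y1, y2 + 1)
--                 for z in range(z1, z2 + 1)}
--     result = set()
--     for x in range(x1, x2 + 1):
--         x_on_face = x1 != x2 and (x == x1 or x == x2)
--         for y in range(y1, y2 + 1):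
--             if x_on_face or (y1 != y2 and (y == y1 or y == y2)):
--                 # a full line of voxels lies on an x- or y-face
--                 for z in range(z1, z2 + 1):
--                     result.add((x, y, z))
--             elif z1 != z2:
--                 # interior in x and y: only the two z-face voxels remain
--                 result.add((x, y, z1))
--                 result.add((x, y, z2))
--     return result
-- ===== Notes on version B (the rewrite author's own statement) =====
-- stated objective: alternative
-- what changed: For fill=False, B enumerates only the boundary voxels directly (full z-lines on x/y-face rows, otherwise just the two z-face voxels) instead of scanning the whole volume and testing each voxel's boundary count against the degenerate-axis count; intended as faster on hollow cuboids (measured 6.12x at the largest timing size, but the probe could not confirm it overall), for fill=True both generate the full volume.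
import Mathlib
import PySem

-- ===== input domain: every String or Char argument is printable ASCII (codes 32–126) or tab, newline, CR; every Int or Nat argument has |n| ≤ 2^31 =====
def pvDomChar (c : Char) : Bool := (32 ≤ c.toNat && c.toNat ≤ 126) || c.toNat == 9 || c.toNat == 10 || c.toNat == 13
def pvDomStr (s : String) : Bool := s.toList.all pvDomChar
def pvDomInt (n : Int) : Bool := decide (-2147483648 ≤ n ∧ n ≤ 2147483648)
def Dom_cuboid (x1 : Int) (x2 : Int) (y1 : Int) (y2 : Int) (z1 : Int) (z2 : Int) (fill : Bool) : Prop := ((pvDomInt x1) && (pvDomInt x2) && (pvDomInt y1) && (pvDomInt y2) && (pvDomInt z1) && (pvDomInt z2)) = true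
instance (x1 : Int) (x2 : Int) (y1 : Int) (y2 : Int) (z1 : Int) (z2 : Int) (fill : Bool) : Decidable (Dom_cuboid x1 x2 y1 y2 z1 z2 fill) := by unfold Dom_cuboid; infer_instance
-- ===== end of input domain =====

-- B replaces A's full-volume scan-and-test with a direct enumeration of the boundary voxels when
-- fill=False (objective: alternative algorithm); for fill=True both generate the full volume.

-- ===== PORT A =====
def cuboid (x1 : Int) (x2 : Int) (y1 : Int) (y2 : Int) (z1 : Int) (z2 : Int) (fill : Bool) : List (List Int) :=
  let (x1, x2) := if x1 ≤ x2 then (x1, x2) else (x2, x1)   -- x1, x2 = sorted((x1, x2))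
  let (y1, y2) := if y1 ≤ y2 then (y1, y2) else (y2, y1)
  let (z1, z2) := if z1 ≤ z2 then (z1, z2) else (z2, z1)
  let a : Int := (if x1 = x2 then 1 else 0) + (if y1 = y2 then 1 else 0) + (if z1 = z2 then 1 else 0)
  (PySem.List.pyRange x1 (x2 + 1) 1).foldl (fun result x =>
    (PySem.List.pyRange y1 (y2 + 1) 1).foldl (fun result y =>
      (PySem.List.pyRange z1 (z2 + 1) 1).foldl (fun result z =>
        let n : Int := (if x = x1 ∨ x = x2 then 1 else 0) + (if y = y1 ∨ y = y2 then 1 else 0)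
                       + (if z = z1 ∨ z = z2 then 1 else 0)
        if fill = false ∧ n ≤ a then result else PySem.Set.add result [x, y, z]) result) result)
    (PySem.Set.empty : PySem.Set (List Int))

-- ===== PORT B =====
def cuboid_alt (x1 : Int) (x2 : Int) (y1 : Int) (y2 : Int) (z1 : Int) (z2 : Int) (fill : Bool) : List (List Int) :=
  let (x1, x2) := if x2 < x1 then (x2, x1) else (x1, x2)
  let (y1, y2) := if y2 < y1 then (y2, y1) else (y1, y2)
  let (z1, z2) := if z2 < z1 then (z2, z1) else (z1, z2)
  if fill then
    -- {(x, y, z) for x in … for y in … for z in …}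
    PySem.Set.ofList ((PySem.List.pyRange x1 (x2 + 1) 1).flatMap fun x =>
      (PySem.List.pyRange y1 (y2 + 1) 1).flatMap fun y =>
        (PySem.List.pyRange z1 (z2 + 1) 1).map fun z => [x, y, z])
  else
    (PySem.List.pyRange x1 (x2 + 1) 1).foldl (fun result x =>
      let xOnFace : Bool := decide (x1 ≠ x2 ∧ (x = x1 ∨ x = x2))
      (PySem.List.pyRange y1 (y2 + 1) 1).foldl (fun result y =>
        if xOnFace = true ∨ (y1 ≠ y2 ∧ (y = y1 ∨ y = y2)) then
          (PySem.List.pyRange z1 (z2 + 1) 1).foldl (fun result z => PySem.Set.add result [x, y, z]) result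
        else if z1 ≠ z2 then
          PySem.Set.add (PySem.Set.add result [x, y, z1]) [x, y, z2]
        else result) result)
      (PySem.Set.empty : PySem.Set (List Int))

-- ===== PRECONDITION & SPEC =====
def Spec_cuboid (x1 : Int) (x2 : Int) (y1 : Int) (y2 : Int) (z1 : Int) (z2 : Int) (fill : Bool) (out : List (List Int)) : Prop := out = cuboid_alt x1 x2 y1 y2 z1 z2 fill
instance (x1 : Int) (x2 : Int) (y1 : Int) (y2 : Int) (z1 : Int) (z2 : Int) (fill : Bool) (out : List (List Int)) : Decidable (Spec_cuboid x1 x2 y1 y2 z1 z2 fill out) := by unfold Spec_cuboid; infer_instance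

-- ===== CLAIM (what is proved, stated in full; the proofs are below) =====
def Claim_equal_cuboid : Prop := ∀ (x1 : Int) (x2 : Int) (y1 : Int) (y2 : Int) (z1 : Int) (z2 : Int) (fill : Bool), Dom_cuboid x1 x2 y1 y2 z1 z2 fill → Spec_cuboid x1 x2 y1 y2 z1 z2 fill (cuboid x1 x2 y1 y2 z1 z2 fill)

-- ===== LEMMAS AND PROOFS =====

-- both ports' two-element sorts produce (min, max)
lemma pairSortA (a b : Int) : (if a ≤ b then (a, b) else (b, a)) = (min a b, max a b) := by
  by_cases h : a ≤ b
  · rw [if_pos h, min_eq_left h, max_eq_right h]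
  · have h' : b ≤ a := le_of_not_ge h
    rw [if_neg h, min_eq_right h', max_eq_left h']

lemma pairSortB (a b : Int) : (if b < a then (b, a) else (a, b)) = (min a b, max a b) := by
  by_cases h : b < a
  · rw [if_pos h, min_eq_right h.le, max_eq_left h.le]
  · have h' : a ≤ b := le_of_not_gt h
    rw [if_neg h, min_eq_left h', max_eq_right h']

-- a 'skip unless kept' set-insertion loop appends the kept, mapped elements
lemma foldl_skip_add {α β : Type} [BEq β] (zs : List α) (p : α → Prop) [DecidablePred p]
    (f : α → β) (s : PySem.Set β) :
    zs.foldl (fun s z => if p z then s else PySem.Set.add s (f z)) s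
      = PySem.Set.update s ((zs.filter (fun z => decide (¬ p z))).map f) := by
  rw [PySem.Set.update_map_eq_foldl_add, List.foldl_filter]
  have : (fun (acc : PySem.Set β) (x : α) => if decide (¬ p x) = true then PySem.Set.add acc (f x) else acc)
       = fun s z => if p z then s else PySem.Set.add s (f z) := by
    funext s z; by_cases h : p z <;> simp [h]
  rw [this]

-- a loop whose body is a Set.update is one big Set.update of the flatMap
lemma foldl_update {α β : Type} [BEq β] (ys : List α) (g : α → List β) (s : PySem.Set β) :
    ys.foldl (fun s y => PySem.Set.update s (g y)) s = PySem.Set.update s (ys.flatMap g) := by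
  induction ys generalizing s with
  | nil => simp [PySem.Set.update_nil]
  | cons y ys ih => simp [ih, PySem.Set.update_append]

lemma two_adds {β : Type} [BEq β] (s : PySem.Set β) (a b : β) :
    PySem.Set.add (PySem.Set.add s a) b = PySem.Set.update s [a, b] := by
  simp [PySem.Set.update_cons, PySem.Set.update_nil]

-- per-axis: boundary indicator = degenerate indicator + nondegenerate-boundary indicator
lemma axis (lo hi v : Int) (h1 : lo ≤ v) (h2 : v ≤ hi) :
    (if v = lo ∨ v = hi then (1 : Int) else 0)
      = (if lo = hi then (1 : Int) else 0) + (if lo ≠ hi ∧ (v = lo ∨ v = hi) then 1 else 0) := by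
  split_ifs <;> omega

lemma keepA_iff (x1 x2 y1 y2 z1 z2 x y z : Int)
    (hx1 : x1 ≤ x) (hx2 : x ≤ x2) (hy1 : y1 ≤ y) (hy2 : y ≤ y2) (hz1 : z1 ≤ z) (hz2 : z ≤ z2) :
    (¬((if x = x1 ∨ x = x2 then (1 : Int) else 0) + (if y = y1 ∨ y = y2 then 1 else 0)
        + (if z = z1 ∨ z = z2 then 1 else 0)
       ≤ (if x1 = x2 then (1 : Int) else 0) + (if y1 = y2 then 1 else 0) + (if z1 = z2 then 1 else 0)))
    ↔ ((x1 ≠ x2 ∧ (x = x1 ∨ x = x2)) ∨ (y1 ≠ y2 ∧ (y = y1 ∨ y = y2)) ∨ (z1 ≠ z2 ∧ (z = z1 ∨ z = z2))) := by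
  rw [axis x1 x2 x hx1 hx2, axis y1 y2 y hy1 hy2, axis z1 z2 z hz1 hz2]
  split_ifs <;> omega

lemma filter_ends (z1 z2 : Int) (h : z1 < z2) :
    (PySem.List.pyRange z1 (z2 + 1) 1).filter (fun z => decide (z = z1 ∨ z = z2)) = [z1, z2] := by
  rw [PySem.List.pyRange_one_append z1 (z1 + 1) (z2 + 1) (by omega) (by omega),
      PySem.List.pyRange_one_append (z1 + 1) z2 (z2 + 1) (by omega) (by omega),
      PySem.List.pyRange_one_singleton]
  have hz2 : PySem.List.pyRange z2 (z2 + 1) 1 = [z2] := PySem.List.pyRange_one_singleton z2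
  simp [List.filter_append, hz2, h.ne]
  omega

-- B's per-(x,y) contribution, as a list
def gyB (x1 x2 y1 y2 z1 z2 x y : Int) : List (List Int) :=
  if (x1 ≠ x2 ∧ (x = x1 ∨ x = x2)) ∨ (y1 ≠ y2 ∧ (y = y1 ∨ y = y2)) then
    (PySem.List.pyRange z1 (z2 + 1) 1).map (fun z => [x, y, z])
  else if z1 ≠ z2 then [[x, y, z1], [x, y, z2]] else []

-- A's kept z-column equals B's per-(x,y) contribution
lemma inner_eq (x1 x2 y1 y2 z1 z2 x y : Int) (hz : z1 ≤ z2)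
    (hx1 : x1 ≤ x) (hx2 : x ≤ x2) (hy1 : y1 ≤ y) (hy2 : y ≤ y2) :
    ((PySem.List.pyRange z1 (z2 + 1) 1).filter (fun z =>
        decide (¬(((if x = x1 ∨ x = x2 then (1 : Int) else 0) + (if y = y1 ∨ y = y2 then 1 else 0))
            + (if z = z1 ∨ z = z2 then 1 else 0)
          ≤ ((if x1 = x2 then (1 : Int) else 0) + (if y1 = y2 then 1 else 0))
            + (if z1 = z2 then 1 else 0))))).map (fun z => [x, y, z])
      = gyB x1 x2 y1 y2 z1 z2 x y := by
  by_cases hc : (x1 ≠ x2 ∧ (x = x1 ∨ x = x2)) ∨ (y1 ≠ y2 ∧ (y = y1 ∨ y = y2))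
  · rw [gyB, if_pos hc, List.filter_eq_self.mpr]
    intro z hzm
    have hb := PySem.List.mem_pyRange_one.mp hzm
    simp only [decide_eq_true_eq]
    exact (keepA_iff x1 x2 y1 y2 z1 z2 x y z hx1 hx2 hy1 hy2 hb.1 (by omega)).mpr (by tauto)
  · rw [gyB, if_neg hc]
    have hcong : ((PySem.List.pyRange z1 (z2 + 1) 1).filter (fun z =>
        decide (¬(((if x = x1 ∨ x = x2 then (1 : Int) else 0) + (if y = y1 ∨ y = y2 then 1 else 0))
            + (if z = z1 ∨ z = z2 then 1 else 0)
          ≤ ((if x1 = x2 then (1 : Int) else 0) + (if y1 = y2 then 1 else 0))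
            + (if z1 = z2 then 1 else 0)))))
        = (PySem.List.pyRange z1 (z2 + 1) 1).filter (fun z => decide (z1 ≠ z2 ∧ (z = z1 ∨ z = z2))) := by
      apply List.filter_congr
      intro z hzm
      have hb := PySem.List.mem_pyRange_one.mp hzm
      simp only [decide_eq_decide]
      rw [keepA_iff x1 x2 y1 y2 z1 z2 x y z hx1 hx2 hy1 hy2 hb.1 (by omega)]
      tauto
    rw [hcong]
    by_cases hzz : z1 = z2
    · subst hzz; simp
    · have hlt : z1 < z2 := lt_of_le_of_ne hz hzz
      have h2 : ((PySem.List.pyRange z1 (z2 + 1) 1).filter (fun z => decide (z1 ≠ z2 ∧ (z = z1 ∨ z = z2))))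
          = (PySem.List.pyRange z1 (z2 + 1) 1).filter (fun z => decide (z = z1 ∨ z = z2)) :=
        List.filter_congr (fun z _ => by simp [hzz])
      rw [h2, filter_ends z1 z2 hlt, if_pos hzz]
      simp

lemma cuboid_core (x1 x2 y1 y2 z1 z2 : Int) (fill : Bool)
    (hx : x1 ≤ x2) (hy : y1 ≤ y2) (hz : z1 ≤ z2) :
    cuboid x1 x2 y1 y2 z1 z2 fill = cuboid_alt x1 x2 y1 y2 z1 z2 fill := by
  simp only [cuboid, cuboid_alt, if_pos hx, if_pos hy, if_pos hz,
    if_neg (not_lt.mpr hx), if_neg (not_lt.mpr hy), if_neg (not_lt.mpr hz)]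
  cases fill with
  | true =>
    simp only [Bool.true_eq_false, false_and, if_false, if_true]
    simp only [← PySem.Set.update_map_eq_foldl_add, foldl_update, PySem.Set.empty,
      PySem.Set.update_nil_left]
  | false =>
    simp only [Bool.false_eq_true, if_false, true_and]
    simp only [foldl_skip_add, foldl_update, PySem.Set.empty, PySem.Set.update_nil_left]
    have hgy : ∀ x : Int, (fun (result : PySem.Set (List Int)) (y : Int) =>
        if decide (x1 ≠ x2 ∧ (x = x1 ∨ x = x2)) = true ∨ y1 ≠ y2 ∧ (y = y1 ∨ y = y2) then
          List.foldl (fun result z => PySem.Set.add result [x, y, z]) result (PySem.List.pyRange z1 (z2 + 1) 1)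
        else if z1 ≠ z2 then (PySem.Set.add result [x, y, z1]).add [x, y, z2] else result)
      = fun result y => PySem.Set.update result (gyB x1 x2 y1 y2 z1 z2 x y) := by
      intro x; funext result y
      by_cases hc : (x1 ≠ x2 ∧ (x = x1 ∨ x = x2)) ∨ (y1 ≠ y2 ∧ (y = y1 ∨ y = y2))
      · rw [if_pos (by simpa using hc)]
        rw [show gyB x1 x2 y1 y2 z1 z2 x y = (PySem.List.pyRange z1 (z2 + 1) 1).map (fun z => [x, y, z]) from by rw [gyB, if_pos hc]]
        rw [← PySem.Set.update_map_eq_foldl_add]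
      · rw [if_neg (by simpa using hc)]
        rw [show gyB x1 x2 y1 y2 z1 z2 x y = (if z1 ≠ z2 then [[x, y, z1], [x, y, z2]] else []) from by rw [gyB, if_neg hc]]
        by_cases hzz : z1 ≠ z2
        · rw [if_pos hzz, if_pos hzz, two_adds]
        · rw [if_neg hzz, if_neg hzz, PySem.Set.update_nil]
    simp only [hgy, foldl_update, PySem.Set.update_nil_left]
    refine congrArg PySem.Set.ofList (List.flatMap_congr fun x hxm => List.flatMap_congr fun y hym => ?_)
    have hbx := PySem.List.mem_pyRange_one.mp hxm
    have hby := PySem.List.mem_pyRange_one.mp hym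
    exact inner_eq x1 x2 y1 y2 z1 z2 x y hz hbx.1 (by omega) hby.1 (by omega)

theorem cuboid_eq_alt (x1 x2 y1 y2 z1 z2 : Int) (fill : Bool) :
    cuboid x1 x2 y1 y2 z1 z2 fill = cuboid_alt x1 x2 y1 y2 z1 z2 fill := by
  have hA : cuboid x1 x2 y1 y2 z1 z2 fill
      = cuboid (min x1 x2) (max x1 x2) (min y1 y2) (max y1 y2) (min z1 z2) (max z1 z2) fill := by
    simp only [cuboid, pairSortA, min_eq_left min_le_max, max_eq_right min_le_max]
  have hB : cuboid_alt x1 x2 y1 y2 z1 z2 fill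
      = cuboid_alt (min x1 x2) (max x1 x2) (min y1 y2) (max y1 y2) (min z1 z2) (max z1 z2) fill := by
    simp only [cuboid_alt, pairSortB, min_eq_left min_le_max, max_eq_right min_le_max]
  rw [hA, hB]
  exact cuboid_core _ _ _ _ _ _ fill min_le_max min_le_max min_le_max

-- ===== VERDICT (by name: the statement is the Claim_ definition above) =====
theorem cuboid_spec : Claim_equal_cuboid := by
  intro x1 x2 y1 y2 z1 z2 fill _
  unfold Spec_cuboid
  exact cuboid_eq_alt x1 x2 y1 y2 z1 z2 fill
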